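-- pv_equiv track=rewrite | github.com/Team-Deepiri/deepiri-cascade | src/deepiri_cascade/ci_logging.py | compute_dependency_waves
-- ===== SOURCE A (Python) =====
-- from typing import Dict, List
--
-- def compute_dependency_waves(graph: Dict[str, List[str]], source: str) -> List[List[str]]:
--     """Topological waves of repos that depend (directly or transitively) on ``source``."""
--     dependents = graph.get(source, [])
--     if not dependents:
--         return []
--
--     waves: List[List[str]] = []
--     processed: set[str] = set()
--     current_wave = list(dependents)
--
--     while current_wave:
--         waves.append(current_wave)
--         processed.update(current_wave)
--
--         next_wave: List[str] = []
--         for repo in current_wave: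
--             for dep in graph.get(repo, []):
--                 if dep not in processed and dep not in next_wave:
--                     next_wave.append(dep)
--
--         current_wave = next_wave
--
--     return waves
-- ===== SOURCE B (Python) =====
-- from typing import Dict, List
-- from collections import deque
--
-- def compute_dependency_waves(graph: Dict[str, List[str]], source: str) -> List[List[str]]:
--     """Single-queue BFS recording discovery levels, then one grouping pass by level."""
--     initial = graph.get(source, [])
--     order = [(repo, 0) for repo in initial]   # wave 0 keeps duplicates, like A
--     queue = deque(order)
--     seen = set(initial)
--     while queue:
--         node, level = queue.popleft()
--         for dep in graph.get(node, []):
--             if dep not in seen: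
--                 seen.add(dep)
--                 entry = (dep, level + 1)
--                 order.append(entry)
--                 queue.append(entry)
--     waves: List[List[str]] = []
--     for node, level in order:
--         while len(waves) <= level:
--             waves.append([])
--         waves[level].append(node)
--     return waves
-- ===== Notes on version B (the rewrite author's own statement) =====
-- stated objective: alternative
-- what changed: Replaces A's wave-by-wave frontier rebuild (inner 'dep not in next_wave' list scan) with a single FIFO-queue BFS that marks nodes in a seen-set and records each node's discovery level, followed by a separate grouping pass that buckets the recorded (node, level) order into waves.
import Mathlib
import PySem

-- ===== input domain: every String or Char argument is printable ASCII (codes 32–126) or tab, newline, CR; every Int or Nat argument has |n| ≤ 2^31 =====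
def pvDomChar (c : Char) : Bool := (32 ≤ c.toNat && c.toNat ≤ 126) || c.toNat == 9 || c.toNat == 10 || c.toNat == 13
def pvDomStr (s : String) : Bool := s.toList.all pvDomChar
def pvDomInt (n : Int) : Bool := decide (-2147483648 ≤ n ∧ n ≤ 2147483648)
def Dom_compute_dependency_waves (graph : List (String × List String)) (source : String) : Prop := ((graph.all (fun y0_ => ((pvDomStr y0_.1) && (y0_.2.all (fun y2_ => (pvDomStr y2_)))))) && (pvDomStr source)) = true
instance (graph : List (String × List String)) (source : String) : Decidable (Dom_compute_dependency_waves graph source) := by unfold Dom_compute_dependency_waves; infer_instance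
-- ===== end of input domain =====

-- B replaces A's wave-by-wave frontier rebuild by a single FIFO-queue BFS recording
-- discovery levels in one traversal, followed by one grouping pass by level.

-- ===== PORT A =====
-- inner double loop of A's `while`: builds `next_wave` from `current_wave` (membership
-- tests against `processed` (P) and the accumulator, exactly as the Python)
def pvNextA (g : PySem.Dict String (List String)) (P : PySem.Set String)
    (N : List String) (W : List String) : List String :=
  W.foldl (fun nw repo =>
    (g.getD repo []).foldl (fun nw2 dep =>
      if dep ∈ P ∨ dep ∈ nw2 then nw2 else nw2 ++ [dep]) nw) N

-- A's `while current_wave` loop; `fuel` bounds the iteration count (proved sufficient below)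
def pvLoopA (g : PySem.Dict String (List String)) :
    Nat → List (List String) → PySem.Set String → List String → Option (List (List String))
  | 0, _, _, _ => none
  | fuel + 1, waves, processed, current =>
    if current = [] then some waves
    else
      let processed' := current.foldl PySem.Set.add processed
      pvLoopA g fuel (waves ++ [current]) processed' (pvNextA g processed' [] current)

def compute_dependency_waves (graph : List (String × List String)) (source : String) : List (List String) :=
  let g := PySem.Dict.ofList graph
  let dependents := g.getD source []
  if dependents = [] then []
  else
    (pvLoopA g (2 * (g.items.flatMap (fun p => p.2)).length + 2) [] PySem.Set.empty dependents).getD []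

-- ===== PORT B =====
-- B's inner `for dep in graph.get(node, [])`: state is (queue, seen, order)
def pvScanB (g : PySem.Dict String (List String)) (level : Nat) (node : String)
    (st : List (String × Nat) × PySem.Set String × List (String × Nat)) :
    List (String × Nat) × PySem.Set String × List (String × Nat) :=
  (g.getD node []).foldl (fun st dep =>
    if dep ∈ st.2.1 then st
    else (st.1 ++ [(dep, level + 1)], PySem.Set.add st.2.1 dep, st.2.2 ++ [(dep, level + 1)])) st

-- B's `while queue` loop; `fuel` bounds the number of pops (proved sufficient below)
def pvLoopB (g : PySem.Dict String (List String)) :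
    Nat → List (String × Nat) → PySem.Set String → List (String × Nat) → Option (List (String × Nat))
  | 0, _, _, _ => none
  | _ + 1, [], _, order => some order
  | fuel + 1, (node, level) :: rest, seen, order =>
    let st := pvScanB g level node (rest, seen, order)
    pvLoopB g fuel st.1 st.2.1 st.2.2

-- B's grouping pass: `while len(waves) <= level: waves.append([])` is the replicate pad
def pvGroupStep (waves : List (List String)) (e : String × Nat) : List (List String) :=
  let waves := waves ++ List.replicate (e.2 + 1 - waves.length) []
  waves.set e.2 (waves.getD e.2 [] ++ [e.1])

def pvGroup (order : List (String × Nat)) : List (List String) :=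
  order.foldl pvGroupStep []

def compute_dependency_waves_alt (graph : List (String × List String)) (source : String) : List (List String) :=
  let g := PySem.Dict.ofList graph
  let initial := g.getD source []
  let order := initial.map (fun r => (r, (0 : Nat)))
  match pvLoopB g ((g.items.flatMap (fun p => p.2)).length + initial.length + 1)
      order (PySem.Set.ofList initial) order with
  | some o => pvGroup o
  | none => []

-- ===== PRECONDITION & SPEC =====
def Spec_compute_dependency_waves (graph : List (String × List String)) (source : String) (out : List (List String)) : Prop := out = compute_dependency_waves_alt graph source
instance (graph : List (String × List String)) (source : String) (out : List (List String)) : Decidable (Spec_compute_dependency_waves graph source out) := by unfold Spec_compute_dependency_waves; infer_instance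

-- ===== CLAIM (what is proved, stated in full; the proofs are below) =====
def Claim_equal_compute_dependency_waves : Prop := ∀ (graph : List (String × List String)) (source : String), Dom_compute_dependency_waves graph source → Spec_compute_dependency_waves graph source (compute_dependency_waves graph source)

-- ===== LEMMAS AND PROOFS =====

-- all strings a `getD` lookup can produce lie in the flattened value lists
def pvU (g : PySem.Dict String (List String)) : List String := g.items.flatMap (fun p => p.2)

lemma pv_mem_getD_U (g : PySem.Dict String (List String)) (k x : String)
    (h : x ∈ g.getD k []) : x ∈ pvU g := by
  rw [PySem.Dict.getD_eq_get?_getD] at h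
  cases hg : g.get? k with
  | none => rw [hg] at h; simp at h
  | some v =>
    rw [hg] at h
    simp only [Option.getD_some] at h
    exact List.mem_flatMap.mpr ⟨(k, v), PySem.Dict.mem_items_of_get?_eq_some g hg, h⟩

-- entries of later waves, tagged with their level
def pvTagFl : Nat → List (List String) → List (String × Nat)
  | _, [] => []
  | l, w :: ws => w.map (fun n => (n, l)) ++ pvTagFl (l + 1) ws

-- membership after a fold of Set.add
lemma pv_mem_foldl_add (W : List String) (S : PySem.Set String) (x : String) :
    x ∈ W.foldl PySem.Set.add S ↔ x ∈ S ∨ x ∈ W := by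
  induction W generalizing S with
  | nil => simp
  | cons w W ih => simp [List.foldl_cons, ih, PySem.Set.mem_add]; tauto

-- accumulator of pvLoopA is a pure prefix
lemma pv_loopA_acc (g : PySem.Dict String (List String)) (f : Nat) :
    ∀ acc P W, pvLoopA g f acc P W = (pvLoopA g f [] P W).map (acc ++ ·) := by
  induction f with
  | zero => intro acc P W; simp [pvLoopA]
  | succ f ih =>
    intro acc P W
    by_cases h : W = []
    · simp [pvLoopA, h]
    · simp only [pvLoopA, if_neg h]
      rw [ih (acc ++ [W]), ih ([] ++ [W])]
      cases pvLoopA g f [] (W.foldl PySem.Set.add P) (pvNextA g (W.foldl PySem.Set.add P) [] W) with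
      | none => simp
      | some r => simp

lemma pv_loopA_shape (g : PySem.Dict String (List String)) (f : Nat) (P : PySem.Set String)
    (W : List String) (Ws : List (List String)) (h : pvLoopA g f [] P W = some Ws) :
    (W = [] → Ws = []) ∧ (W ≠ [] → ∃ t, Ws = W :: t ∧
      pvLoopA g (f - 1) [] (W.foldl PySem.Set.add P) (pvNextA g (W.foldl PySem.Set.add P) [] W) = some t) := by
  cases f with
  | zero => simp [pvLoopA] at h
  | succ f =>
    constructor
    · intro hW
      subst hW
      simp [pvLoopA] at h
      exact h
    · intro hW
      simp only [pvLoopA, if_neg hW, List.nil_append] at h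
      rw [pv_loopA_acc] at h
      cases heq : pvLoopA g f [] (W.foldl PySem.Set.add P) (pvNextA g (W.foldl PySem.Set.add P) [] W) with
      | none => rw [heq] at h; simp at h
      | some t =>
        rw [heq] at h
        simp only [Option.map_some, Option.some.injEq] at h
        exact ⟨t, by simpa using h.symm, by simpa using heq⟩

-- pvNextA only depends on membership in P
lemma pv_nextA_congr (g : PySem.Dict String (List String)) (P P' : PySem.Set String)
    (hPP : ∀ x, x ∈ P ↔ x ∈ P') : ∀ (W N : List String), pvNextA g P N W = pvNextA g P' N W := by
  have inner : ∀ (ds : List String) (N : List String),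
      ds.foldl (fun nw2 dep => if dep ∈ P ∨ dep ∈ nw2 then nw2 else nw2 ++ [dep]) N
        = ds.foldl (fun nw2 dep => if dep ∈ P' ∨ dep ∈ nw2 then nw2 else nw2 ++ [dep]) N := by
    intro ds
    induction ds with
    | nil => intro N; rfl
    | cons d ds ih =>
      intro N
      simp only [List.foldl_cons]
      have hiff : (d ∈ P ∨ d ∈ N) ↔ (d ∈ P' ∨ d ∈ N) := by rw [hPP]
      by_cases hd : d ∈ P' ∨ d ∈ N
      · rw [if_pos (hiff.mpr hd), if_pos hd]; exact ih _
      · rw [if_neg (fun hc => hd (hiff.mp hc)), if_neg hd]; exact ih _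
  intro W
  induction W with
  | nil => intro N; rfl
  | cons w W ih =>
    intro N
    simp only [pvNextA, List.foldl_cons] at *
    rw [inner]
    exact ih _

-- pvNextA appends fresh elements
lemma pv_nextA_spec (g : PySem.Dict String (List String)) (P : PySem.Set String) :
    ∀ (W N : List String), ∃ D, pvNextA g P N W = N ++ D ∧
      (∀ x ∈ D, x ∉ P ∧ x ∈ pvU g) := by
  have inner : ∀ (r : String) (ds : List String), (∀ x ∈ ds, x ∈ pvU g) → ∀ N,
      ∃ D, ds.foldl (fun nw2 dep => if dep ∈ P ∨ dep ∈ nw2 then nw2 else nw2 ++ [dep]) N = N ++ D ∧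
        (∀ x ∈ D, x ∉ P ∧ x ∈ pvU g) := by
    intro _r ds
    induction ds with
    | nil => intro _ N; exact ⟨[], by simp, by simp⟩
    | cons d ds ih =>
      intro hds N
      have hds' : ∀ x ∈ ds, x ∈ pvU g := fun x hx => hds x (List.mem_cons_of_mem _ hx)
      simp only [List.foldl_cons]
      by_cases hd : d ∈ P ∨ d ∈ N
      · rw [if_pos hd]; exact ih hds' N
      · rw [if_neg hd]
        obtain ⟨D, hD, hDm⟩ := ih hds' (N ++ [d])
        refine ⟨[d] ++ D, by rw [hD]; simp, ?_⟩
        intro y hy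
        rcases List.mem_append.mp hy with hy | hy
        · simp at hy; subst hy
          exact ⟨fun hc => hd (Or.inl hc), hds y (by simp)⟩
        · exact hDm y hy
  intro W
  induction W with
  | nil => intro N; exact ⟨[], by simp [pvNextA], by simp⟩
  | cons w W ih =>
    intro N
    simp only [pvNextA, List.foldl_cons]
    obtain ⟨D0, hD0, hD0m⟩ := inner w (g.getD w []) (fun x hx => pv_mem_getD_U g w x hx) N
    obtain ⟨D1, hD1, hD1m⟩ := ih (N ++ D0)
    simp only [pvNextA] at hD1
    rw [hD0]
    refine ⟨D0 ++ D1, by rw [hD1]; simp, ?_⟩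
    intro x hx
    rcases List.mem_append.mp hx with hx | hx
    · exact hD0m x hx
    · exact hD1m x hx

lemma pv_nextA_nodup (g : PySem.Dict String (List String)) (P : PySem.Set String) :
    ∀ (W N : List String), N.Nodup → (pvNextA g P N W).Nodup := by
  have inner : ∀ (ds : List String) (N : List String), N.Nodup →
      (ds.foldl (fun nw2 dep => if dep ∈ P ∨ dep ∈ nw2 then nw2 else nw2 ++ [dep]) N).Nodup := by
    intro ds
    induction ds with
    | nil => intro N h; exact h
    | cons d ds ih =>
      intro N h
      simp only [List.foldl_cons]
      by_cases hd : d ∈ P ∨ d ∈ N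
      · rw [if_pos hd]; exact ih N h
      · rw [if_neg hd]
        refine ih _ (List.Nodup.append h (List.nodup_singleton d) ?_)
        intro a ha hb
        simp only [List.mem_singleton] at hb
        exact hd (Or.inr (hb ▸ ha))
  intro W
  induction W with
  | nil => intro N h; simpa [pvNextA] using h
  | cons w W ih =>
    intro N h
    simp only [pvNextA, List.foldl_cons] at *
    exact ih _ (inner _ _ h)

-- one node's neighbour scan in B matches one step of A's inner fold
lemma pv_scanB_spec (_g : PySem.Dict String (List String)) (l : Nat) (T : PySem.Set String) :
    ∀ (ds : List String) (N : List String) (q O : List (String × Nat)) (S : PySem.Set String),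
      (∀ x, x ∈ S ↔ x ∈ T ∨ x ∈ N) →
      ∃ D S',
        ds.foldl (fun nw2 dep => if dep ∈ T ∨ dep ∈ nw2 then nw2 else nw2 ++ [dep]) N = N ++ D ∧
        ds.foldl (fun st dep =>
          if dep ∈ st.2.1 then st
          else (st.1 ++ [(dep, l + 1)], PySem.Set.add st.2.1 dep, st.2.2 ++ [(dep, l + 1)]))
          (q, S, O) = (q ++ D.map (fun n => (n, l + 1)), S', O ++ D.map (fun n => (n, l + 1))) ∧
        (∀ x, x ∈ S' ↔ x ∈ T ∨ x ∈ N ++ D) := by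
  intro ds
  induction ds with
  | nil =>
    intro N q O S hinv
    exact ⟨[], S, by simp, by simp, by simpa using hinv⟩
  | cons d ds ih =>
    intro N q O S hinv
    simp only [List.foldl_cons]
    by_cases hd : d ∈ T ∨ d ∈ N
    · have hdS : d ∈ S := (hinv d).mpr (by simpa using hd)
      rw [if_pos hd]
      rw [show (if d ∈ (q, S, O).2.1 then (q, S, O)
          else ((q, S, O).1 ++ [(d, l + 1)], PySem.Set.add (q, S, O).2.1 d, (q, S, O).2.2 ++ [(d, l + 1)]))
          = (q, S, O) from if_pos hdS]
      exact ih N q O S hinv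
    · have hdS : d ∉ S := fun hc => hd ((hinv d).mp hc)
      rw [if_neg hd]
      rw [show (if d ∈ (q, S, O).2.1 then (q, S, O)
          else ((q, S, O).1 ++ [(d, l + 1)], PySem.Set.add (q, S, O).2.1 d, (q, S, O).2.2 ++ [(d, l + 1)]))
          = (q ++ [(d, l + 1)], PySem.Set.add S d, O ++ [(d, l + 1)]) from if_neg hdS]
      have hinv' : ∀ x, x ∈ PySem.Set.add S d ↔ x ∈ T ∨ x ∈ N ++ [d] := by
        intro x
        rw [PySem.Set.mem_add, hinv x]
        simp
        tauto
      obtain ⟨D', S', hA, hB, hS'⟩ := ih (N ++ [d]) (q ++ [(d, l + 1)]) (O ++ [(d, l + 1)]) (PySem.Set.add S d) hinv'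
      refine ⟨d :: D', S', ?_, ?_, ?_⟩
      · rw [hA]; simp
      · rw [hB]; simp
      · intro x; rw [hS' x]; simp

-- B consumes one wave segment of the queue exactly as A's inner double loop dictates
lemma pv_segB (g : PySem.Dict String (List String)) (T : PySem.Set String) (l : Nat) :
    ∀ (Wrem : List String) (fB : Nat) (N : List String) (S : PySem.Set String) (O : List (String × Nat)),
      (∀ x, x ∈ S ↔ x ∈ T ∨ x ∈ N) →
      ∃ D S',
        pvNextA g T N Wrem = N ++ D ∧
        pvLoopB g (Wrem.length + fB) (Wrem.map (fun n => (n, l)) ++ N.map (fun n => (n, l + 1))) S O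
          = pvLoopB g fB ((N ++ D).map (fun n => (n, l + 1))) S' (O ++ D.map (fun n => (n, l + 1))) ∧
        (∀ x, x ∈ S' ↔ x ∈ T ∨ x ∈ N ++ D) := by
  intro Wrem
  induction Wrem with
  | nil =>
    intro fB N S O hinv
    exact ⟨[], S, by simp [pvNextA], by simp, by simpa using hinv⟩
  | cons w Wrem ih =>
    intro fB N S O hinv
    obtain ⟨D0, S1, hA0, hB0, hS1⟩ :=
      pv_scanB_spec g l T (g.getD w []) N (Wrem.map (fun n => (n, l)) ++ N.map (fun n => (n, l + 1))) O S hinv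
    obtain ⟨D1, S', hA1, hB1, hS'⟩ := ih fB (N ++ D0) S1 (O ++ D0.map (fun n => (n, l + 1))) hS1
    refine ⟨D0 ++ D1, S', ?_, ?_, ?_⟩
    · show pvNextA g T N (w :: Wrem) = N ++ (D0 ++ D1)
      simp only [pvNextA, List.foldl_cons] at hA1 ⊢
      rw [hA0, hA1]
      simp
    · have hlen : (w :: Wrem).length + fB = (Wrem.length + fB) + 1 := by simp; omega
      rw [hlen]
      simp only [List.map_cons, List.cons_append, pvLoopB, pvScanB]
      rw [hB0]
      have hq : Wrem.map (fun n => (n, l)) ++ N.map (fun n => (n, l + 1)) ++ D0.map (fun n => (n, l + 1))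
          = Wrem.map (fun n => (n, l)) ++ (N ++ D0).map (fun n => (n, l + 1)) := by simp
      rw [show ((Wrem.map (fun n => (n, l)) ++ N.map (fun n => (n, l + 1)) ++ D0.map (fun n => (n, l + 1)),
            S1, O ++ D0.map (fun n => (n, l + 1))) :
            List (String × Nat) × PySem.Set String × List (String × Nat)).1
          = Wrem.map (fun n => (n, l)) ++ (N ++ D0).map (fun n => (n, l + 1)) from hq]
      rw [show ((Wrem.map (fun n => (n, l)) ++ N.map (fun n => (n, l + 1)) ++ D0.map (fun n => (n, l + 1)),
            S1, O ++ D0.map (fun n => (n, l + 1))) :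
            List (String × Nat) × PySem.Set String × List (String × Nat)).2.1 = S1 from rfl]
      rw [show ((Wrem.map (fun n => (n, l)) ++ N.map (fun n => (n, l + 1)) ++ D0.map (fun n => (n, l + 1)),
            S1, O ++ D0.map (fun n => (n, l + 1))) :
            List (String × Nat) × PySem.Set String × List (String × Nat)).2.2
          = O ++ D0.map (fun n => (n, l + 1)) from rfl]
      rw [hB1]
      simp
    · intro x; rw [hS' x]; simp

-- the simulation: from any wave boundary, B's queue run produces exactly the tagged later waves
lemma pv_outSim (g : PySem.Dict String (List String)) :
    ∀ (fA : Nat) (P : PySem.Set String) (W : List String) (S : PySem.Set String)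
      (O : List (String × Nat)) (l : Nat) (Ws : List (List String)),
      (∀ x, x ∈ S ↔ x ∈ P ∨ x ∈ W) →
      pvLoopA g fA [] P W = some Ws →
      pvLoopB g (Ws.flatten.length + 1) (W.map (fun n => (n, l))) S O
        = some (O ++ pvTagFl (l + 1) Ws.tail) := by
  intro fA
  induction fA with
  | zero => intro P W S O l Ws _ h; simp [pvLoopA] at h
  | succ fA ih =>
    intro P W S O l Ws hinv h
    by_cases hW : W = []
    · subst hW
      have hWs : Ws = [] := ((pv_loopA_shape g (fA + 1) P [] Ws h).1 rfl)
      subst hWs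
      simp [pvLoopB, pvTagFl]
    · obtain ⟨t, hWs, ht⟩ := (pv_loopA_shape g (fA + 1) P W Ws h).2 hW
      simp only [Nat.add_sub_cancel] at ht
      subst hWs
      set P' := W.foldl PySem.Set.add P with hP'
      have hP'S : ∀ x, x ∈ P' ↔ x ∈ S := by
        intro x
        rw [hP', pv_mem_foldl_add, hinv]
      have hWseq : pvNextA g P' [] W = pvNextA g S [] W := pv_nextA_congr g P' S hP'S W []
      obtain ⟨D, S', hA, hB, hS'⟩ := pv_segB g S l W (t.flatten.length + 1) [] S O (by simp [hinv])
      simp only [List.nil_append, List.map_nil, List.append_nil, List.map_nil] at hA hB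
      -- D is exactly the next wave
      have hD : pvNextA g P' [] W = D := by rw [hWseq, hA]
      have hinv' : ∀ x, x ∈ S' ↔ x ∈ P' ∨ x ∈ pvNextA g P' [] W := by
        intro x
        rw [hD, hS' x, hP'S x]
        simp
      have hrec := ih P' (pvNextA g P' [] W) S' (O ++ D.map (fun n => (n, l + 1))) (l + 1) t hinv' ht
      rw [hD] at hrec
      have hflat : (W :: t).flatten.length + 1 = W.length + (t.flatten.length + 1) := by
        simp [List.flatten_cons]
        omega
      rw [hflat, hB, hrec]
      -- identify the tagged tail
      have htag : pvTagFl (l + 1) (W :: t).tail = D.map (fun n => (n, l + 1)) ++ pvTagFl (l + 2) t.tail := by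
        cases t with
        | nil =>
          -- then the next wave D must be empty
          have hshape := pv_loopA_shape g fA P' (pvNextA g P' [] W) [] ht
          by_cases hD0 : pvNextA g P' [] W = []
          · rw [hD0] at hD
            simp [pvTagFl, ← hD]
          · obtain ⟨t', ht', _⟩ := hshape.2 hD0
            simp at ht'
        | cons w' t' =>
          have hshape := pv_loopA_shape g fA P' (pvNextA g P' [] W) (w' :: t') ht
          have hne : pvNextA g P' [] W ≠ [] := by
            intro hc
            have := hshape.1 hc
            simp at this
          obtain ⟨t'', ht'', _⟩ := hshape.2 hne
          have hw' : w' = pvNextA g P' [] W := (List.cons.injEq _ _ _ _ ▸ ht'').1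
          rw [List.tail_cons]
          rw [show pvTagFl (l + 1) (w' :: t') = w'.map (fun n => (n, l + 1)) ++ pvTagFl (l + 2) t' from rfl]
          rw [hw', hD]
          simp
      rw [htag]
      simp

lemma pv_loopB_mono (g : PySem.Dict String (List String)) :
    ∀ (f f' : Nat) (q : List (String × Nat)) (S : PySem.Set String) (O r : List (String × Nat)),
      f ≤ f' → pvLoopB g f q S O = some r → pvLoopB g f' q S O = some r := by
  intro f
  induction f with
  | zero => intro f' q S O r _ h; simp [pvLoopB] at h
  | succ f ih =>
    intro f' q S O r hle h
    cases f' with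
    | zero => omega
    | succ f' =>
      cases q with
      | nil => simpa [pvLoopB] using h
      | cons e rest =>
        obtain ⟨node, level⟩ := e
        simp only [pvLoopB] at h ⊢
        exact ih f' _ _ _ _ (by omega) h

-- strict / non-strict counting of unprocessed universe elements
lemma pv_filter_le (U : List String) (P P' : PySem.Set String) (hsub : ∀ y, y ∈ P → y ∈ P') :
    (U.filter (fun u => !decide (u ∈ P'))).length ≤ (U.filter (fun u => !decide (u ∈ P))).length := by
  refine List.Sublist.length_le (List.monotone_filter_right U ?_)
  intro a ha
  simp only [Bool.not_eq_true', decide_eq_false_iff_not] at *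
  exact fun h => ha (hsub a h)

lemma pv_filter_lt (P P' : PySem.Set String) (x : String) (hsub : ∀ y, y ∈ P → y ∈ P')
    (hxP : x ∉ P) (hxP' : x ∈ P') :
    ∀ (U : List String), x ∈ U →
      (U.filter (fun u => !decide (u ∈ P'))).length < (U.filter (fun u => !decide (u ∈ P))).length := by
  intro U
  induction U with
  | nil => intro h; simp at h
  | cons u U ih =>
    intro hmem
    by_cases hxu : x = u
    · subst hxu
      simp only [List.filter_cons]
      rw [if_neg (by simp [hxP']), if_pos (by simp [hxP])]
      exact Nat.lt_succ_of_le (pv_filter_le U P P' hsub)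
    · have hxU : x ∈ U := by
        rcases List.mem_cons.mp hmem with h | h
        · exact absurd h hxu
        · exact h
      have hlt := ih hxU
      simp only [List.filter_cons]
      by_cases hu' : u ∈ P'
      · rw [if_neg (by simp [hu'])]
        by_cases hu : u ∈ P
        · rw [if_neg (by simp [hu])]; exact hlt
        · rw [if_pos (by simp [hu])]; simpa using Nat.lt_succ_of_lt hlt
      · have hu : u ∉ P := fun hc => hu' (hsub u hc)
        rw [if_pos (by simp [hu']), if_pos (by simp [hu])]
        simpa using hlt

-- A's loop measure
def pvMA (g : PySem.Dict String (List String)) (P : PySem.Set String) (W : List String) : Nat :=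
  2 * ((pvU g).filter (fun u => !decide (u ∈ P))).length +
    (if W.any (fun x => decide (x ∈ pvU g) && !decide (x ∈ P)) then 0 else 1)

lemma pv_suffA (g : PySem.Dict String (List String)) :
    ∀ (n : Nat) (acc : List (List String)) (P : PySem.Set String) (W : List String),
      (∀ x ∈ W, x ∈ pvU g) → pvMA g P W ≤ n → (pvLoopA g (n + 1) acc P W).isSome := by
  intro n
  induction n with
  | zero =>
    intro acc P W hWU hm
    by_cases hW : W = []
    · simp [pvLoopA, hW]
    · exfalso
      unfold pvMA at hm
      by_cases hany : W.any (fun x => decide (x ∈ pvU g) && !decide (x ∈ P)) = true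
      · obtain ⟨x, hxW, hx⟩ := List.any_eq_true.mp hany
        simp only [Bool.and_eq_true, decide_eq_true_eq, Bool.not_eq_true', decide_eq_false_iff_not] at hx
        have : x ∈ (pvU g).filter (fun u => !decide (u ∈ P)) :=
          List.mem_filter.mpr ⟨hx.1, by simp [hx.2]⟩
        have := List.length_pos_of_mem this
        omega
      · rw [if_neg hany] at hm
        omega
  | succ n ih =>
    intro acc P W hWU hm
    by_cases hW : W = []
    · simp [pvLoopA, hW]
    · simp only [pvLoopA, if_neg hW]
      set P' := W.foldl PySem.Set.add P with hP'
      set W' := pvNextA g P' [] W with hW'def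
      by_cases hW' : W' = []
      · cases n with
        | zero => simp [hW']
        | succ m => simp [hW']
      · obtain ⟨D, hDeq, hDm⟩ := pv_nextA_spec g P' W []
        simp only [List.nil_append] at hDeq
        have hWm : ∀ x ∈ W', x ∉ P' ∧ x ∈ pvU g := by
          intro x hx
          rw [hW'def, hDeq] at hx
          exact hDm x hx
        have hsub : ∀ y, y ∈ P → y ∈ P' := by
          intro y hy; rw [hP', pv_mem_foldl_add]; exact Or.inl hy
        have hWU' : ∀ x ∈ W', x ∈ pvU g := fun x hx => (hWm x hx).2
        -- the new flag is 0
        have hany' : W'.any (fun x => decide (x ∈ pvU g) && !decide (x ∈ P')) = true := by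
          obtain ⟨x, hx⟩ := List.exists_mem_of_ne_nil W' hW'
          exact List.any_eq_true.mpr ⟨x, hx, by simp [(hWm x hx).1, (hWm x hx).2]⟩
        have hflag' : pvMA g P' W' = 2 * ((pvU g).filter (fun u => !decide (u ∈ P'))).length := by
          unfold pvMA; rw [if_pos hany']; omega
        refine ih (acc ++ [W]) P' W' hWU' ?_
        rw [hflag']
        by_cases hx : ∃ x ∈ W, x ∈ pvU g ∧ x ∉ P
        · obtain ⟨x, hxW, hxU, hxP⟩ := hx
          have hxP' : x ∈ P' := by rw [hP', pv_mem_foldl_add]; exact Or.inr hxW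
          have hlt := pv_filter_lt P P' x hsub hxP hxP' (pvU g) hxU
          have hmle : 2 * ((pvU g).filter (fun u => !decide (u ∈ P))).length ≤ pvMA g P W := by
            unfold pvMA; omega
          omega
        · replace hx : ∀ x ∈ W, x ∈ pvU g → x ∈ P := fun x hxW hxU => by
            by_contra hc
            exact hx ⟨x, hxW, hxU, hc⟩
          have hcongr : (pvU g).filter (fun u => !decide (u ∈ P')) = (pvU g).filter (fun u => !decide (u ∈ P)) := by
            refine List.filter_congr ?_
            intro u hu
            by_cases huP : u ∈ P
            · simp [huP, hsub u huP]
            · have : u ∉ P' := by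
                rw [hP', pv_mem_foldl_add]
                rintro (h | h)
                · exact huP h
                · exact huP (hx u h hu)
              simp [huP, this]
          have hflag : pvMA g P W = 2 * ((pvU g).filter (fun u => !decide (u ∈ P))).length + 1 := by
            unfold pvMA
            by_cases ha : W.any (fun x => decide (x ∈ pvU g) && !decide (x ∈ P)) = true
            · obtain ⟨x, hxW, hxx⟩ := List.any_eq_true.mp ha
              simp only [Bool.and_eq_true, decide_eq_true_eq, Bool.not_eq_true',
                decide_eq_false_iff_not] at hxx
              exact absurd (hx x hxW hxx.1) hxx.2
            · rw [if_neg ha]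
          rw [hcongr]
          omega

-- every produced wave is nonempty
lemma pv_loopA_ne (g : PySem.Dict String (List String)) :
    ∀ (f : Nat) (acc : List (List String)) (P : PySem.Set String) (W : List String) (Ws : List (List String)),
      pvLoopA g f acc P W = some Ws → (∀ v ∈ acc, v ≠ []) → ∀ v ∈ Ws, v ≠ [] := by
  intro f
  induction f with
  | zero => intro acc P W Ws h; simp [pvLoopA] at h
  | succ f ih =>
    intro acc P W Ws h hacc
    by_cases hW : W = []
    · simp [pvLoopA, hW] at h
      subst h; exact hacc
    · simp only [pvLoopA, if_neg hW] at h
      refine ih _ _ _ _ h ?_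
      intro v hv
      rcases List.mem_append.mp hv with hv | hv
      · exact hacc v hv
      · simp at hv; subst hv; exact hW

-- total size of the later waves is bounded by the unprocessed universe
lemma pv_loopA_bnd (g : PySem.Dict String (List String)) :
    ∀ (f : Nat) (P : PySem.Set String) (W : List String) (Ws : List (List String)),
      pvLoopA g f [] P W = some Ws →
      Ws.tail.flatten.length ≤ ((pvU g).filter (fun u => !decide (u ∈ W.foldl PySem.Set.add P))).length := by
  have count : ∀ (L : List String) (Q : PySem.Set String), L.Nodup → (∀ x ∈ L, x ∈ pvU g ∧ x ∉ Q) →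
      ((pvU g).filter (fun u => !decide (u ∈ L.foldl PySem.Set.add Q))).length + L.length
        ≤ ((pvU g).filter (fun u => !decide (u ∈ Q))).length := by
    intro L
    induction L with
    | nil =>
      intro Q _ _
      simp only [List.foldl_nil, List.length_nil, Nat.add_zero]
      exact Nat.le_refl _
    | cons x L ihL =>
      intro Q hnd hmem
      have hx := hmem x (by simp)
      have hnd' := (List.nodup_cons.mp hnd)
      have hmem' : ∀ y ∈ L, y ∈ pvU g ∧ y ∉ PySem.Set.add Q x := by
        intro y hy
        refine ⟨(hmem y (by simp [hy])).1, ?_⟩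
        rw [PySem.Set.mem_add]
        rintro (h | h)
        · exact (hmem y (by simp [hy])).2 h
        · exact hnd'.1 (h ▸ hy)
      have hrec := ihL (PySem.Set.add Q x) hnd'.2 hmem'
      have hlt := pv_filter_lt Q (PySem.Set.add Q x) x
        (fun y hy => (PySem.Set.mem_add Q x y).mpr (Or.inl hy)) hx.2
        ((PySem.Set.mem_add Q x x).mpr (Or.inr rfl)) (pvU g) hx.1
      show ((pvU g).filter (fun u => !decide (u ∈ List.foldl PySem.Set.add (PySem.Set.add Q x) L))).length
          + (L.length + 1) ≤ ((pvU g).filter (fun u => !decide (u ∈ Q))).length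
      omega
  intro f
  induction f with
  | zero => intro P W Ws h; simp [pvLoopA] at h
  | succ f ih =>
    intro P W Ws h
    by_cases hW : W = []
    · rw [(pv_loopA_shape g (f + 1) P W Ws h).1 hW]
      simp
    · obtain ⟨t, hWs, ht⟩ := (pv_loopA_shape g (f + 1) P W Ws h).2 hW
      simp only [Nat.add_sub_cancel] at ht
      subst hWs
      set P' := W.foldl PySem.Set.add P with hP'
      set W' := pvNextA g P' [] W with hW'def
      rw [List.tail_cons]
      by_cases hW' : W' = []
      · rw [(pv_loopA_shape g f P' W' t ht).1 hW']
        simp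
      · obtain ⟨t', hts, _⟩ := (pv_loopA_shape g f P' W' t ht).2 hW'
        have hrec := ih P' W' t ht
        rw [hts] at hrec ⊢
        simp only [List.tail_cons] at hrec
        simp only [List.flatten_cons, List.length_append]
        obtain ⟨D, hDeq, hDm⟩ := pv_nextA_spec g P' W []
        simp only [List.nil_append] at hDeq
        have hnodup : W'.Nodup := pv_nextA_nodup g P' W [] List.nodup_nil
        have hmem : ∀ x ∈ W', x ∈ pvU g ∧ x ∉ P' := by
          intro x hx
          rw [hW'def, hDeq] at hx
          exact ⟨(hDm x hx).2, (hDm x hx).1⟩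
        have hcnt := count W' P' hnodup hmem
        omega

-- grouping a tagged wave list reproduces the waves
lemma pv_group_aux :
    ∀ (Ws : List (List String)) (acc : List (List String)), (∀ w ∈ Ws, w ≠ []) →
      List.foldl pvGroupStep acc (pvTagFl acc.length Ws) = acc ++ Ws := by
  have gextend : ∀ (w' : List String) (v : List String) (acc : List (List String)) (rest : List (String × Nat)),
      List.foldl pvGroupStep (acc ++ [v]) ((w'.map (fun n => (n, acc.length))) ++ rest)
        = List.foldl pvGroupStep (acc ++ [v ++ w']) rest := by
    intro w'
    induction w' with
    | nil => intro v acc rest; simp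
    | cons y w'' ih =>
      intro v acc rest
      simp only [List.map_cons, List.cons_append, List.foldl_cons]
      have hstep : pvGroupStep (acc ++ [v]) (y, acc.length) = acc ++ [v ++ [y]] := by
        unfold pvGroupStep
        simp [List.getD]
      rw [hstep, ih (v ++ [y]) acc rest]
      simp
  intro Ws
  induction Ws with
  | nil => intro acc _; simp [pvTagFl]
  | cons w Ws' ih =>
    intro acc hne
    have hw := hne w (by simp)
    cases hwc : w with
    | nil => exact absurd hwc hw
    | cons x w' =>
      rw [show pvTagFl acc.length ((x :: w') :: Ws')
          = (x :: w').map (fun n => (n, acc.length)) ++ pvTagFl (acc.length + 1) Ws' from rfl]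
      simp only [List.map_cons, List.cons_append, List.foldl_cons]
      have hstep : pvGroupStep acc (x, acc.length) = acc ++ [[x]] := by
        unfold pvGroupStep
        simp [List.getD]
      rw [hstep, gextend w' [x] acc (pvTagFl (acc.length + 1) Ws')]
      have hlen : acc.length + 1 = (acc ++ [[x] ++ w']).length := by simp
      rw [hlen, ih (acc ++ [[x] ++ w']) (fun v hv => hne v (by simp [hv]))]
      simp

-- ===== VERDICT (by name: the statement is the Claim_ definition above) =====
theorem compute_dependency_waves_spec : Claim_equal_compute_dependency_waves := by
  unfold Claim_equal_compute_dependency_waves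
  intro graph source _
  unfold Spec_compute_dependency_waves compute_dependency_waves compute_dependency_waves_alt
  dsimp only []
  set g := PySem.Dict.ofList graph with hg
  set dep := g.getD source [] with hdepdef
  set U := g.items.flatMap (fun p => p.2) with hU
  have hUpv : pvU g = U := rfl
  by_cases h0 : dep = []
  · rw [if_pos h0, h0]
    simp [pvLoopB, pvGroup]
  · rw [if_neg h0]
    -- run A to completion
    have hsome := pv_suffA g (2 * U.length + 1) [] PySem.Set.empty dep
      (fun x hx => pv_mem_getD_U g source x hx)
      (by
        unfold pvMA
        have hle : ((pvU g).filter (fun u => !decide (u ∈ (PySem.Set.empty : PySem.Set String)))).length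
            ≤ (pvU g).length := List.length_filter_le _ _
        rw [hUpv] at hle
        rw [hUpv]
        split <;> omega)
    have hfa : 2 * U.length + 1 + 1 = 2 * U.length + 2 := by omega
    rw [hfa] at hsome
    obtain ⟨Ws, hWs⟩ := Option.isSome_iff_exists.mp hsome
    rw [hWs]
    -- identify the head wave
    obtain ⟨t, hWst, _⟩ := (pv_loopA_shape g (2 * U.length + 2) PySem.Set.empty dep Ws hWs).2 h0
    -- run the simulation from the initial state of B
    have hinv : ∀ x, x ∈ PySem.Set.ofList dep ↔ x ∈ (PySem.Set.empty : PySem.Set String) ∨ x ∈ dep := by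
      intro x
      rw [PySem.Set.mem_ofList]
      simp [PySem.Set.empty]
    have hsim := pv_outSim g (2 * U.length + 2) PySem.Set.empty dep
      (PySem.Set.ofList dep) (dep.map (fun r => (r, (0 : Nat)))) 0 Ws hinv hWs
    -- B's fuel is at least the total number of pops
    have hbnd := pv_loopA_bnd g (2 * U.length + 2) PySem.Set.empty dep Ws hWs
    have hfuel : Ws.flatten.length + 1 ≤ U.length + dep.length + 1 := by
      have h1 : ((pvU g).filter (fun u => !decide (u ∈ dep.foldl PySem.Set.add PySem.Set.empty))).length
          ≤ (pvU g).length := List.length_filter_le _ _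
      have h2 : Ws.flatten.length = dep.length + Ws.tail.flatten.length := by
        rw [hWst]; simp
      rw [hUpv] at h1 hbnd
      omega
    have hB := pv_loopB_mono g (Ws.flatten.length + 1) (U.length + dep.length + 1) _ _ _ _ hfuel hsim
    rw [hB]
    -- reduce the match and group the tagged discovery order back into the waves
    show (some Ws).getD []
        = pvGroup (dep.map (fun r => (r, (0 : Nat))) ++ pvTagFl 1 Ws.tail)
    have htag0 : dep.map (fun r => (r, (0 : Nat))) ++ pvTagFl 1 Ws.tail = pvTagFl 0 Ws := by
      rw [hWst]
      rfl
    rw [htag0, Option.getD_some]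
    have hne := pv_loopA_ne g (2 * U.length + 2) [] PySem.Set.empty dep Ws hWs (by simp)
    have hgrp := pv_group_aux Ws [] hne
    simp only [List.length_nil, List.nil_append] at hgrp
    exact hgrp.symm
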